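-- pv_equiv track=rewrite | github.com/Yogesh0723/mockRepo | AddressDataGenerator.py | create_bio_tags
-- ===== SOURCE A (Python) =====
-- def create_bio_tags(tokens, components):
--     tags = ['O'] * len(tokens)
--     used_indices = set()
--
--     def assign_tags(comp_type, comp_value):
--         if not comp_value:
--             return
--
--         comp_tokens = comp_value.split()
--         for i in range(len(tokens) - len(comp_tokens) + 1):
--             # Ensure no overlap
--             if any(idx in used_indices for idx in range(i, i + len(comp_tokens))):
--                 continue
--
--             window = tokens[i:i + len(comp_tokens)]
--
--             if window == comp_tokens:
--                 tags[i] = f'B-{comp_type.upper()}'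
--                 used_indices.update([i])
--                 for j in range(1, len(comp_tokens)):
--                     tags[i + j] = f'I-{comp_type.upper()}'
--                     used_indices.update([i + j])
--                 break
--
--         # Assign tags in priority order
--     assign_tags('flat', components.get('flat'))
--     assign_tags('house_num', components.get('house_num'))
--     assign_tags('house_name', components.get('house_name'))
--     assign_tags('street', components.get('street'))
--
--     return tags
-- ===== SOURCE B (Python) =====
-- def create_bio_tags(tokens, components):
--     # Hash index: token -> ascending list of its positions. Each component is then
--     # matched only at the positions where its first token occurs, instead of
--     # scanning every window start of the token list.
--     index = {}
--     for pos, tok in enumerate(tokens):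
--         index.setdefault(tok, []).append(pos)
--
--     tags = ['O'] * len(tokens)
--     for name in ('flat', 'house_num', 'house_name', 'street'):
--         value = components.get(name)
--         comp = value.split() if value else []
--         if comp:
--             m = len(comp)
--             for i in index.get(comp[0], []):
--                 if tokens[i:i + m] == comp and all(t == 'O' for t in tags[i:i + m]):
--                     tags[i:i + m] = ['B-' + name.upper()] + ['I-' + name.upper()] * (m - 1)
--                     break
--     return tags
-- ===== Notes on version B (the rewrite author's own statement) =====
-- stated objective: alternative
-- what changed: B builds a hash index token->positions in one pass and matches each component only at the positions of its first token (picking the first candidate whose window matches and is still all-'O'), so A's per-component scan over every window start and its used_indices bookkeeping disappear.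
-- outside the precondition, e.g. on create_bio_tags(['x'], {'flat': ' '}): A returns ['B-FLAT'], B returns ['O']; on create_bio_tags([], {'flat': ' '}): A raises IndexError, B returns []
import Mathlib
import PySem

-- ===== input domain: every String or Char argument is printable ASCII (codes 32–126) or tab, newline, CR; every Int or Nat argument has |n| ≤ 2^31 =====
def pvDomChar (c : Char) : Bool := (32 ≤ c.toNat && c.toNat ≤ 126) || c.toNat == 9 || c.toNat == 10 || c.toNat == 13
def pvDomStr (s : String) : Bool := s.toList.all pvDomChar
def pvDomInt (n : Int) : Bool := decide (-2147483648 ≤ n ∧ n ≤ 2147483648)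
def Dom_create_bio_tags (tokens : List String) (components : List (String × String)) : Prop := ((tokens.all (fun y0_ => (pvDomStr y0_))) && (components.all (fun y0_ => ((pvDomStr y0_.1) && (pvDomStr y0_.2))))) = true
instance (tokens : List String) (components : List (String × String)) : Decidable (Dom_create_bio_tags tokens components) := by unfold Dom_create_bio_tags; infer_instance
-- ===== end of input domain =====

-- B builds a token->positions hash index once and matches each component only at the positions of its
-- first token, replacing A's per-component scan over every window start and its used_indices set;
-- objective: alternative (a genuinely different algorithm; no speed claim).


-- ===== PORT A =====
-- A's inner loop body over candidate start i, threading (tags, used_indices, broke?) as state.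
def bodyA (tokens compTokens : List String) (lab : String)
    (acc : List String × PySem.Set Int × Bool) (i : Int) :
    List String × PySem.Set Int × Bool :=
  if acc.2.2 then acc   -- after the 'break'
  else
    let tags := acc.1
    let used := acc.2.1
    let m : Int := compTokens.length
    if (PySem.List.pyRange i (i + m) 1).any (fun idx => PySem.Set.contains used idx) then acc
    else if PySem.List.slice tokens (some i) (some (i + m)) = compTokens then
      let tags' := PySem.List.pySetD tags i ("B-" ++ lab)
      let used' := PySem.Set.add used i
      let p := (PySem.List.pyRange 1 m 1).foldl
        (fun (p : List String × PySem.Set Int) j =>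
          (PySem.List.pySetD p.1 (i + j) ("I-" ++ lab), PySem.Set.add p.2 (i + j)))
        (tags', used')
      (p.1, p.2, true)
    else acc

-- assign_tags(comp_type, comp_value) acting on the closed-over state (tags, used_indices)
def assignA (tokens : List String) (compType : String) (compValue? : Option String)
    (st : List String × PySem.Set Int) : List String × PySem.Set Int :=
  match compValue? with
  | none => st            -- 'if not comp_value: return'
  | some v =>
    if v = "" then st
    else
      let compTokens := PySem.Str.split₀ v
      let r := (PySem.List.pyRange 0 ((tokens.length : Int) - compTokens.length + 1) 1).foldl
          (bodyA tokens compTokens (PySem.Str.upper compType)) (st.1, st.2, false)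
      (r.1, r.2.1)

def create_bio_tags (tokens : List String) (components : List (String × String)) : List String :=
  let d : PySem.Dict String String := PySem.Dict.mk components
  let st0 := (List.replicate tokens.length "O", (PySem.Set.empty : PySem.Set Int))
  let st1 := assignA tokens "flat" (d.get? "flat") st0
  let st2 := assignA tokens "house_num" (d.get? "house_num") st1
  let st3 := assignA tokens "house_name" (d.get? "house_name") st2
  let st4 := assignA tokens "street" (d.get? "street") st3
  st4.1

-- ===== PORT B =====
-- index = {}; for pos, tok in enumerate(tokens): index.setdefault(tok, []).append(pos)
def buildIndexB (tokens : List String) : PySem.Dict String (List Int) :=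
  (PySem.List.enumerate tokens).foldl
    (fun d p => PySem.Dict.modify d p.2 [] (fun l => l ++ [p.1])) PySem.Dict.empty

-- the candidate test: tokens[i:i+m] == comp and all(t == 'O' for t in tags[i:i+m])
def condB2 (tokens tags comp : List String) (i : Int) : Bool :=
  PySem.List.slice tokens (some i) (some (i + (comp.length : Int))) == comp &&
    (PySem.List.slice tags (some i) (some (i + (comp.length : Int)))).all (fun t => t == "O")

def create_bio_tags_alt (tokens : List String) (components : List (String × String)) : List String :=
  let index := buildIndexB tokens
  ["flat", "house_num", "house_name", "street"].foldl
    (fun tags name =>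
      let comp := match (PySem.Dict.mk components).get? name with
        | none => []
        | some v => if v = "" then [] else PySem.Str.split₀ v
      match comp with
      | [] => tags
      | t0 :: rest =>        -- comp[0] = t0; candidates = index.get(comp[0], [])
        match (index.getD t0 []).find? (condB2 tokens tags (t0 :: rest)) with
        | some i =>          -- tags[i:i+m] = ['B-..'] + ['I-..'] * (m-1)
            PySem.List.slice tags none (some i)
              ++ ("B-" ++ PySem.Str.upper name) :: (List.replicate ((t0 :: rest).length - 1) ("I-" ++ PySem.Str.upper name)
                  ++ PySem.List.slice tags (some (i + ((t0 :: rest).length : Int))) none)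
        | none => tags)
    (List.replicate tokens.length "O")

-- ===== PRECONDITION & SPEC =====
-- Pre_ excludes inputs where one of the four component values is nonempty but all whitespace: its token
-- list is empty and A then B-tags the first still-untagged token (the empty sequence matches anywhere) or
-- raises IndexError when no token is free — an unspecified corner; B tags nothing for an empty sequence.
def Pre_create_bio_tags (tokens : List String) (components : List (String × String)) : Prop :=
  (["flat", "house_num", "house_name", "street"].all (fun ct =>
    ((PySem.Dict.mk components).get? ct).all (fun v =>
      v == "" || decide (PySem.Str.split₀ v ≠ [])))) = true
instance (tokens : List String) (components : List (String × String)) : Decidable (Pre_create_bio_tags tokens components) := by unfold Pre_create_bio_tags; infer_instance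

def pvWitness_create_bio_tags : List String × (List (String × String)) :=
  (["12", "baker", "street"], [("house_num", "12"), ("street", "baker street")])

def Spec_create_bio_tags (tokens : List String) (components : List (String × String)) (out : List String) : Prop := out = create_bio_tags_alt tokens components
instance (tokens : List String) (components : List (String × String)) (out : List String) : Decidable (Spec_create_bio_tags tokens components out) := by unfold Spec_create_bio_tags; infer_instance

-- ===== CLAIM (what is proved, stated in full; the proofs are below) =====
def Claim_equal_create_bio_tags : Prop := ∀ (tokens : List String) (components : List (String × String)), Dom_create_bio_tags tokens components → Pre_create_bio_tags tokens components → Spec_create_bio_tags tokens components (create_bio_tags tokens components)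

-- ===== LEMMAS AND PROOFS =====
-- (everything below is proof-side: A's loop is characterised as a first-match over window starts,
--  and B's index lookup is shown to enumerate, in the same ascending order, exactly the window
--  starts that can match, so the two first-matches coincide.)

-- A's overlap test phrased on the tag list: the window is all-'O' and the tokens match
def condB (tokens tags compTokens : List String) (i : Int) : Bool :=
  (PySem.List.slice tags (some i) (some (i + compTokens.length))).all (fun t => t == "O") &&
    PySem.List.slice tokens (some i) (some (i + compTokens.length)) == compTokens

theorem condB_eq_condB2 (tokens tags comp : List String) :
    condB tokens tags comp = condB2 tokens tags comp := by
  funext i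
  simp [condB, condB2, Bool.and_comm]

-- the used_indices set holds exactly the already-tagged (non-'O') positions
def InvTU (tags : List String) (used : PySem.Set Int) : Prop :=
  ∀ k : Int, 0 ≤ k → (k ∈ used ↔ PySem.List.pyGetD tags k "O" ≠ "O")

theorem B_ne_O (lab : String) : ("B-" ++ lab) ≠ "O" := by
  intro h
  have h2 := congrArg String.length h
  rw [String.length_append, show "B-".length = 2 from rfl, show "O".length = 1 from rfl] at h2
  omega

theorem I_ne_O (lab : String) : ("I-" ++ lab) ≠ "O" := by
  intro h
  have h2 := congrArg String.length h
  rw [String.length_append, show "I-".length = 2 from rfl, show "O".length = 1 from rfl] at h2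
  omega

-- tags[i:i+m] as a map over the index range
theorem slice_eq_map_range (xs : List String) (i m : Nat) (h : i + m ≤ xs.length) :
    PySem.List.slice xs (some (i : Int)) (some ((i : Int) + (m : Int))) =
      (PySem.List.pyRange (i : Int) ((i : Int) + (m : Int)) 1).map (fun j => PySem.List.pyGetD xs j "O") := by
  rw [PySem.List.slice_natCast_add, PySem.List.pyRange_one]
  have hlen : (((i : Int) + m - i).toNat) = m := by omega
  rw [hlen]
  apply List.ext_getElem
  · simp; omega
  · intro n h1 h2
    simp only [List.getElem_take, List.getElem_drop, List.getElem_map, List.getElem_range]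
    have : (i : Int) + (n : Int) = ((i + n : Nat) : Int) := by push_cast; ring
    rw [this, PySem.List.pyGetD_natCast]
    rw [List.getD_eq_getElem?_getD, List.getElem?_eq_getElem (by simp at h1 ⊢; omega)]
    simp

-- after the break, the rest of the loop does nothing
theorem foldl_bodyA_done (tokens compTokens : List String) (lab : String)
    (l : List Int) (acc : List String × PySem.Set Int × Bool) (h : acc.2.2 = true) :
    l.foldl (bodyA tokens compTokens lab) acc = acc := by
  induction l generalizing acc with
  | nil => rfl
  | cons x xs ih => simp [List.foldl, bodyA, h, ih _ h]

-- the tag-writing loop of A is the functional slice rebuild of B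
theorem setfold_eq_rebuild (B I : String) :
    ∀ (m : Nat) (tags : List String) (i : Nat), 1 ≤ m → i + m ≤ tags.length →
    (PySem.List.pyRange 1 (m : Int) 1).foldl
        (fun (t : List String) j => PySem.List.pySetD t ((i : Int) + j) I)
        (PySem.List.pySetD tags (i : Int) B) =
      tags.take i ++ B :: (List.replicate (m - 1) I ++ tags.drop (i + m)) := by
  intro m
  induction m with
  | zero => omega
  | succ m ih =>
    intro tags i hm him
    by_cases hm1 : m = 0
    · subst hm1
      rw [PySem.List.pyRange_one_eq_nil (by norm_num)]
      simp only [List.foldl_nil, PySem.List.pySetD_natCast]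
      rw [List.set_eq_take_cons_drop B (by omega)]
      simp
    · have h1m : 1 ≤ m := by omega
      have hcast : ((m + 1 : Nat) : Int) = (m : Int) + 1 := by push_cast; ring
      rw [hcast, PySem.List.pyRange_one_succ_right (by exact_mod_cast h1m), List.foldl_append]
      rw [ih tags i h1m (by omega)]
      simp only [List.foldl_cons, List.foldl_nil]
      have hcast2 : (i : Int) + (m : Int) = ((i + m : Nat) : Int) := by push_cast; ring
      rw [hcast2, PySem.List.pySetD_natCast]
      rw [List.set_eq_take_cons_drop I (by simp; omega)]
      have hX : (tags.take i).length = i := by simp; omega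
      have ht : (tags.take i ++ B :: (List.replicate (m - 1) I ++ tags.drop (i + m))).take (i + m)
          = tags.take i ++ B :: List.replicate (m - 1) I := by
        rw [List.take_append, List.take_of_length_le (by omega), hX]
        have h2 : i + m - i = m := by omega
        rw [h2]
        cases m with
        | zero => omega
        | succ m' =>
          simp only [List.take_succ_cons]
          have hR : (List.replicate (m' + 1 - 1) I).length ≤ m' := by simp
          rw [List.take_append, List.take_of_length_le hR]
          simp
      have hd : (tags.take i ++ B :: (List.replicate (m - 1) I ++ tags.drop (i + m))).drop (i + m + 1)
          = tags.drop (i + m + 1) := by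
        rw [List.drop_append, List.drop_eq_nil_of_le (by omega), hX]
        have h2 : i + m + 1 - i = m + 1 := by omega
        rw [h2]
        simp only [List.drop_succ_cons]
        rw [List.drop_append, List.drop_eq_nil_of_le (by simp)]
        simp [List.drop_drop]
        congr 1
        omega
      rw [ht, hd]
      have hrep : List.replicate (m + 1 - 1) I = List.replicate (m - 1) I ++ [I] := by
        have h3 : m + 1 - 1 = (m - 1) + 1 := by omega
        rw [h3, List.replicate_succ']
      rw [hrep]
      simp
      omega

-- reading one position of the rebuilt tag list
theorem getD_rebuild (tags : List String) (i m : Nat) (B I : String) (k : Nat)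
    (him : i + m ≤ tags.length) (hm : 1 ≤ m) :
    (tags.take i ++ B :: (List.replicate (m - 1) I ++ tags.drop (i + m))).getD k "O" =
      if k = i then B
      else if i < k ∧ k < i + m then I
      else tags.getD k "O" := by
  have hX : (tags.take i).length = i := by simp; omega
  rcases Nat.lt_trichotomy k i with h | h | h
  · rw [List.getD_append _ _ _ _ (by omega)]
    rw [if_neg (by omega), if_neg (by omega)]
    rw [List.getD_eq_getElem?_getD, List.getElem?_take_of_lt h, ← List.getD_eq_getElem?_getD]
  · subst h
    rw [List.getD_append_right _ _ _ _ (by omega), hX]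
    simp
  · rw [List.getD_append_right _ _ _ _ (by omega), hX]
    have h1 : k - i = (k - i - 1) + 1 := by omega
    rw [h1]
    simp only [List.getD_cons_succ]
    rw [if_neg (by omega)]
    by_cases h2 : k < i + m
    · rw [if_pos (by omega)]
      rw [List.getD_append _ _ _ _ (by simp; omega)]
      exact List.getD_replicate I (by omega)
    · rw [if_neg (by omega)]
      rw [List.getD_append_right _ _ _ _ (by simp; omega)]
      simp only [List.length_replicate]
      rw [List.getD_eq_getElem?_getD, List.getElem?_drop, ← List.getD_eq_getElem?_getD]
      congr 1
      omega

-- membership in the used set after A's update loop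
theorem mem_usedfold (used : PySem.Set Int) (i : Int) (m : Nat) (hm : 1 ≤ m) (k : Int) :
    k ∈ (PySem.List.pyRange 1 (m : Int) 1).foldl
        (fun (s : PySem.Set Int) j => PySem.Set.add s (i + j)) (PySem.Set.add used i) ↔
      k ∈ used ∨ (i ≤ k ∧ k < i + m) := by
  rw [PySem.Set.mem_foldl_add]
  simp only [PySem.Set.mem_add, PySem.List.mem_pyRange_one]
  constructor
  · rintro ((h | h) | ⟨j, ⟨hj1, hj2⟩, rfl⟩)
    · exact Or.inl h
    · right; omega
    · right; omega
  · rintro (h | h)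
    · exact Or.inl (Or.inl h)
    · by_cases hk : k = i
      · exact Or.inl (Or.inr hk)
      · exact Or.inr ⟨k - i, ⟨by omega, by omega⟩, by omega⟩

-- core induction: A's scan-with-break is the first match over window starts, preserving the invariant
theorem loopA_eq (tokens compTokens : List String) (lab : String) (hm : compTokens ≠ []) :
    ∀ (cnt : Nat) (a : Int) (tags : List String) (used : PySem.Set Int),
    0 ≤ a → tags.length = tokens.length →
    cnt = ((tokens.length : Int) - compTokens.length + 1 - a).toNat →
    InvTU tags used →
    (let r := (PySem.List.pyRange a ((tokens.length : Int) - compTokens.length + 1) 1).foldl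
        (bodyA tokens compTokens lab) (tags, used, false)
     r.1 = (match (PySem.List.pyRange a ((tokens.length : Int) - compTokens.length + 1) 1).find?
            (condB tokens tags compTokens) with
        | some i =>
            PySem.List.slice tags none (some i)
              ++ ("B-" ++ lab) :: (List.replicate (compTokens.length - 1) ("I-" ++ lab)
                  ++ PySem.List.slice tags (some (i + compTokens.length)) none)
        | none => tags)
      ∧ r.1.length = tags.length ∧ InvTU r.1 r.2.1) := by
  intro cnt
  induction cnt with
  | zero =>
    intro a tags used ha hlen hcnt hinv
    rw [PySem.List.pyRange_one_eq_nil (by omega)]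
    exact ⟨rfl, rfl, hinv⟩
  | succ n ih =>
    intro a tags used ha hlen hcnt hinv
    have hmlen : 1 ≤ compTokens.length := List.length_pos_of_ne_nil hm
    have hab : a < (tokens.length : Int) - compTokens.length + 1 := by omega
    rw [PySem.List.pyRange_one_cons hab]
    simp only [List.foldl_cons]
    have haN : a = ((a.toNat : Nat) : Int) := by omega
    have hwin_le : a.toNat + compTokens.length ≤ tags.length := by omega
    have hslice : PySem.List.slice tags (some a) (some (a + compTokens.length)) =
        (PySem.List.pyRange a (a + compTokens.length) 1).map (fun j => PySem.List.pyGetD tags j "O") := by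
      rw [haN]
      exact slice_eq_map_range tags a.toNat compTokens.length hwin_le
    by_cases hfree : ∀ idx : Int, a ≤ idx → idx < a + compTokens.length →
        PySem.List.pyGetD tags idx "O" = "O"
    · -- the window is still free: A does not skip on overlap
      have hany : (PySem.List.pyRange a (a + (compTokens.length : Int)) 1).any
          (fun idx => PySem.Set.contains used idx) = false := by
        apply List.any_eq_false.2
        intro idx hidx
        rw [PySem.List.mem_pyRange_one] at hidx
        by_contra hc
        rw [PySem.Set.contains_iff] at hc
        exact ((hinv idx (by omega)).1 hc) (hfree idx hidx.1 hidx.2)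
      have hallO : (PySem.List.slice tags (some a) (some (a + (compTokens.length : Int)))).all
          (fun t => t == "O") = true := by
        rw [hslice, List.all_map, List.all_eq_true]
        intro idx hidx
        rw [PySem.List.mem_pyRange_one] at hidx
        simpa using hfree idx hidx.1 hidx.2
      by_cases hwin : PySem.List.slice tokens (some a) (some (a + (compTokens.length : Int))) = compTokens
      · -- match: A tags the window and breaks; the first match is a
        have hcond : condB tokens tags compTokens a = true := by
          simp only [condB, hallO, Bool.true_and, beq_iff_eq]
          exact hwin
        rw [List.find?_cons_of_pos hcond]
        dsimp only
        simp only [bodyA, hany, Bool.false_eq_true, if_false, if_pos hwin]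
        rw [foldl_bodyA_done tokens compTokens lab _ _ rfl]
        rw [PySem.List.foldl_prod_mk
          (f := fun (t : List String) j => PySem.List.pySetD t (a + j) ("I-" ++ lab))
          (g := fun (s : PySem.Set Int) j => PySem.Set.add s (a + j))]
        have htags : (PySem.List.pyRange 1 (compTokens.length : Int) 1).foldl
            (fun (t : List String) j => PySem.List.pySetD t (a + j) ("I-" ++ lab))
            (PySem.List.pySetD tags a ("B-" ++ lab)) =
            tags.take a.toNat ++ ("B-" ++ lab) ::
              (List.replicate (compTokens.length - 1) ("I-" ++ lab) ++ tags.drop (a.toNat + compTokens.length)) := by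
          rw [haN]
          exact setfold_eq_rebuild _ _ compTokens.length tags a.toNat hmlen hwin_le
        refine ⟨?_, ?_, ?_⟩
        · rw [htags, PySem.List.slice_to tags ha, PySem.List.slice_from tags (by omega)]
          have h1 : (a + (compTokens.length : Int)).toNat = a.toNat + compTokens.length := by omega
          rw [h1]
        · rw [htags]
          simp
          omega
        · intro k hk
          rw [htags]
          rw [mem_usedfold used a compTokens.length hmlen k]
          have hk2 : k = ((k.toNat : Nat) : Int) := by omega
          rw [hk2, PySem.List.pyGetD_natCast]
          rw [getD_rebuild tags a.toNat compTokens.length _ _ k.toNat hwin_le hmlen]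
          split_ifs with h1 h2
          · constructor
            · intro _; exact B_ne_O lab
            · intro _; right; omega
          · constructor
            · intro _; exact I_ne_O lab
            · intro _; right; omega
          · have hiv := hinv k (by omega)
            rw [hk2, PySem.List.pyGetD_natCast] at hiv
            rw [← hiv]
            constructor
            · rintro (h | h)
              · exact h
              · exfalso; omega
            · exact Or.inl
      · -- window free but tokens do not match: both sides skip a
        have hcond : condB tokens tags compTokens a = false := by
          simp only [condB, Bool.and_eq_false_iff, beq_eq_false_iff_ne, ne_eq]
          exact Or.inr hwin
        rw [List.find?_cons_of_neg (by simp [hcond])]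
        simp only [bodyA, hany, Bool.false_eq_true, if_false, if_neg hwin]
        exact ih (a + 1) tags used (by omega) hlen (by omega) hinv
    · -- overlap: A skips on used_indices, the all-'O' test fails
      push_neg at hfree
      obtain ⟨idx, hidx1, hidx2, hidx3⟩ := hfree
      have hany : (PySem.List.pyRange a (a + (compTokens.length : Int)) 1).any
          (fun idx => PySem.Set.contains used idx) = true := by
        apply List.any_eq_true.2
        refine ⟨idx, ?_, ?_⟩
        · rw [PySem.List.mem_pyRange_one]; exact ⟨hidx1, hidx2⟩
        · rw [PySem.Set.contains_iff]
          exact (hinv idx (by omega)).2 hidx3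
      have hcond : condB tokens tags compTokens a = false := by
        simp only [condB, Bool.and_eq_false_iff]
        left
        apply List.all_eq_false.2
        rw [hslice]
        refine ⟨PySem.List.pyGetD tags idx "O", List.mem_map.2 ⟨idx, ?_, rfl⟩, by simpa using hidx3⟩
        rw [PySem.List.mem_pyRange_one]; exact ⟨hidx1, hidx2⟩
      rw [List.find?_cons_of_neg (by simp [hcond])]
      simp only [bodyA, hany, if_pos]
      exact ih (a + 1) tags used (by omega) hlen (by omega) hinv

-- ------- B's index characterised: positions of t in ascending order -------

def posL (tokens : List String) (t : String) : List Int :=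
  ((PySem.List.enumerate tokens).filter (fun p => p.2 == t)).map (·.1)

theorem getD_buildIndexB (tokens : List String) (t : String) :
    (buildIndexB tokens).getD t [] = posL tokens t := by
  have h := PySem.Dict.getD_foldl_modify_append
    (l := (PySem.List.enumerate tokens).map (fun p => (p.2, p.1)))
    (d := (PySem.Dict.empty : PySem.Dict String (List Int))) (c := t)
  rw [List.foldl_map] at h
  simpa [buildIndexB, posL, PySem.Dict.getD_empty, List.filter_map, Function.comp] using h

theorem mem_posL (tokens : List String) (t : String) (i : Int) :
    i ∈ posL tokens t ↔ ∃ (k : Nat) (_ : k < tokens.length), i = (k : Int) ∧ tokens[k] = t := by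
  simp only [posL, List.mem_map, List.mem_filter, PySem.List.mem_enumerate_iff]
  constructor
  · rintro ⟨p, ⟨⟨k, hk, rfl⟩, hpt⟩, rfl⟩
    exact ⟨k, hk, by simp, by simpa using hpt⟩
  · rintro ⟨k, hk, rfl, ht⟩
    exact ⟨((k : Int), tokens[k]), ⟨⟨k, hk, by simp⟩, by simpa using ht⟩, rfl⟩

theorem pairwise_posL (tokens : List String) (t : String) :
    (posL tokens t).Pairwise (· < ·) := by
  unfold posL
  rw [List.pairwise_map]
  exact List.Pairwise.sublist List.filter_sublist (PySem.List.pairwise_lt_enumerate tokens 0)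

-- ------- first match over two sorted candidate lists with the same matches -------

theorem find?_min_of_sorted {α : Type} [LinearOrder α] (p : α → Bool) :
    ∀ (l : List α), l.Pairwise (· < ·) → ∀ x, l.find? p = some x →
      ∀ y ∈ l, p y = true → x ≤ y := by
  intro l
  induction l with
  | nil => intro _ x hx; simp at hx
  | cons a tl ih =>
    intro hs x hx y hy hpy
    by_cases hpa : p a = true
    · rw [List.find?_cons_of_pos hpa] at hx
      cases hx
      rcases hy with _ | hy
      · exact le_refl _
      · exact le_of_lt ((List.pairwise_cons.mp hs).1 y (by assumption))
    · rw [List.find?_cons_of_neg (by simpa using hpa)] at hx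
      rcases hy with _ | hy
      · exact absurd hpy hpa
      · exact ih (List.pairwise_cons.mp hs).2 x hx y (by assumption) hpy

theorem find?_eq_some_of_sorted {α : Type} [LinearOrder α] (p : α → Bool) :
    ∀ (l : List α), l.Pairwise (· < ·) → ∀ x, x ∈ l → p x = true →
      (∀ y ∈ l, p y = true → x ≤ y) → l.find? p = some x := by
  intro l
  induction l with
  | nil => intro _ x hx; simp at hx
  | cons a tl ih =>
    intro hs x hx hpx hmin
    by_cases hpa : p a = true
    · rw [List.find?_cons_of_pos hpa]
      rcases hx with _ | hx
      · rfl
      · exfalso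
        have h1 : a < x := (List.pairwise_cons.mp hs).1 x (by assumption)
        have h2 : x ≤ a := hmin a (List.mem_cons_self ..) hpa
        exact absurd h1 (not_lt.mpr h2)
    · rw [List.find?_cons_of_neg (by simpa using hpa)]
      rcases hx with _ | hx
      · exact absurd hpx hpa
      · exact ih (List.pairwise_cons.mp hs).2 x (by assumption) hpx
          (fun y hy hpy => hmin y (List.mem_cons_of_mem a hy) hpy)

theorem find?_eq_of_sorted {α : Type} [LinearOrder α] (p : α → Bool) (l1 l2 : List α)
    (h1 : l1.Pairwise (· < ·)) (h2 : l2.Pairwise (· < ·))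
    (h : ∀ x, p x = true → (x ∈ l1 ↔ x ∈ l2)) : l1.find? p = l2.find? p := by
  cases hf : l1.find? p with
  | none =>
    rw [List.find?_eq_none] at hf
    symm
    rw [List.find?_eq_none]
    intro y hy hpy
    exact hf y ((h y hpy).mpr hy) hpy
  | some x =>
    have hpx : p x = true := List.find?_some hf
    have hx1 : x ∈ l1 := List.mem_of_find?_eq_some hf
    exact (find?_eq_some_of_sorted p l2 h2 x ((h x hpx).mp hx1) hpx
      (fun y hy hpy => find?_min_of_sorted p l1 h1 x hf y ((h y hpy).mpr hy) hpy)).symm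

-- a matching candidate lies in range and starts with the component's first token
theorem cond_facts (tokens tags : List String) (t0 : String) (rest : List String) (i : Int)
    (h0 : 0 ≤ i) (hc : condB2 tokens tags (t0 :: rest) i = true) :
    i.toNat + (rest.length + 1) ≤ tokens.length ∧ tokens[i.toNat]? = some t0 := by
  simp only [condB2, Bool.and_eq_true, beq_iff_eq] at hc
  have hm := hc.1
  rw [PySem.List.slice_toNat tokens h0 (by simp; omega)] at hm
  have hnn : (i + ((t0 :: rest).length : Int)).toNat - i.toNat = rest.length + 1 := by
    simp only [List.length_cons]; omega
  rw [hnn] at hm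
  have hlen := congrArg List.length hm
  simp only [List.length_take, List.length_drop, List.length_cons] at hlen
  refine ⟨by omega, ?_⟩
  have hh := congrArg (fun l => l[0]?) hm
  simp only at hh
  rw [List.getElem?_take_of_lt (by omega), List.getElem?_drop] at hh
  simpa using hh

-- the first match over all window starts equals the first match over the index's candidates
theorem find?_index_eq (tokens tags : List String) (t0 : String) (rest : List String) :
    (PySem.List.pyRange 0 ((tokens.length : Int) - ((t0 :: rest).length : Int) + 1) 1).find?
        (condB2 tokens tags (t0 :: rest)) =
      (posL tokens t0).find? (condB2 tokens tags (t0 :: rest)) := by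
  apply find?_eq_of_sorted
  · exact PySem.List.pairwise_lt_pyRange_one ..
  · exact pairwise_posL tokens t0
  · intro x hx
    by_cases h0 : 0 ≤ x
    · obtain ⟨h1, h2⟩ := cond_facts tokens tags t0 rest x h0 hx
      have hxx : ((x.toNat : Nat) : Int) = x := Int.toNat_of_nonneg h0
      constructor
      · intro _
        rw [mem_posL]
        obtain ⟨hlt, hg⟩ := List.getElem?_eq_some_iff.mp h2
        exact ⟨x.toNat, hlt, hxx.symm, hg⟩
      · intro _
        rw [PySem.List.mem_pyRange_one]
        simp only [List.length_cons]
        omega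
    · constructor
      · intro hmem
        rw [PySem.List.mem_pyRange_one] at hmem
        omega
      · intro hmem
        rw [mem_posL] at hmem
        obtain ⟨k, _, rfl, _⟩ := hmem
        omega

-- B's per-component step (the body of the foldl in create_bio_tags_alt), as a named function
def stepB2 (index : PySem.Dict String (List Int)) (tokens tags : List String)
    (o : Option String) (ct : String) : List String :=
  let comp := match o with
    | none => []
    | some v => if v = "" then [] else PySem.Str.split₀ v
  match comp with
  | [] => tags
  | t0 :: rest =>
    match (index.getD t0 []).find? (condB2 tokens tags (t0 :: rest)) with
    | some i =>
        PySem.List.slice tags none (some i)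
          ++ ("B-" ++ PySem.Str.upper ct) :: (List.replicate ((t0 :: rest).length - 1) ("I-" ++ PySem.Str.upper ct)
              ++ PySem.List.slice tags (some (i + ((t0 :: rest).length : Int))) none)
    | none => tags

-- one assign_tags call is B's step, preserving length and the invariant
theorem assign_eq (tokens : List String) (ct : String) (o : Option String)
    (tags : List String) (used : PySem.Set Int)
    (hlen : tags.length = tokens.length) (hinv : InvTU tags used)
    (hpre : o.all (fun v => v == "" || decide (PySem.Str.split₀ v ≠ [])) = true) :
    (assignA tokens ct o (tags, used)).1 = stepB2 (buildIndexB tokens) tokens tags o ct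
      ∧ (assignA tokens ct o (tags, used)).1.length = tokens.length
      ∧ InvTU (assignA tokens ct o (tags, used)).1 (assignA tokens ct o (tags, used)).2 := by
  match o with
  | none => exact ⟨by simp [assignA, stepB2], by simpa [assignA] using hlen, by simpa [assignA] using hinv⟩
  | some v =>
    by_cases hv : v = ""
    · subst hv
      exact ⟨by simp [assignA, stepB2], by simpa [assignA] using hlen, by simpa [assignA] using hinv⟩
    · have hne : PySem.Str.split₀ v ≠ [] := by
        simp only [Option.all_some, Bool.or_eq_true, beq_iff_eq, decide_eq_true_eq] at hpre
        tauto
      obtain ⟨t0, rest, hsplit⟩ := List.exists_cons_of_ne_nil hne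
      have hloop := loopA_eq tokens (PySem.Str.split₀ v) (PySem.Str.upper ct) hne
        (((tokens.length : Int) - (PySem.Str.split₀ v).length + 1).toNat) 0 tags used
        le_rfl hlen (by omega) hinv
      simp only at hloop
      obtain ⟨h1, h2, h3⟩ := hloop
      have hB : stepB2 (buildIndexB tokens) tokens tags (some v) ct =
          match (posL tokens t0).find? (condB2 tokens tags (t0 :: rest)) with
          | some i =>
              PySem.List.slice tags none (some i)
                ++ ("B-" ++ PySem.Str.upper ct) :: (List.replicate ((t0 :: rest).length - 1) ("I-" ++ PySem.Str.upper ct)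
                    ++ PySem.List.slice tags (some (i + ((t0 :: rest).length : Int))) none)
          | none => tags := by
        simp only [stepB2, if_neg hv, hsplit, getD_buildIndexB]
      refine ⟨?_, ?_, ?_⟩
      · simp only [assignA, if_neg hv, hB]
        rw [h1, hsplit, condB_eq_condB2, find?_index_eq]
      · simpa only [assignA, if_neg hv, hlen] using h2.trans hlen
      · simp only [assignA, if_neg hv]
        exact h3

-- the initial state satisfies the invariant
theorem inv_init (n : Nat) : InvTU (List.replicate n "O") PySem.Set.empty := by
  intro k hk
  constructor
  · intro h
    exact absurd h (List.not_mem_nil)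
  · intro h
    exfalso
    apply h
    have hk2 : k = ((k.toNat : Nat) : Int) := by omega
    rw [hk2, PySem.List.pyGetD_natCast, List.getD_eq_getElem?_getD, List.getElem?_replicate]
    split <;> rfl

-- ===== VERDICT (by name: the statement is the Claim_ definition above) =====
theorem create_bio_tags_spec : Claim_equal_create_bio_tags := by
  intro tokens components hdom hpre
  unfold Spec_create_bio_tags
  simp only [Pre_create_bio_tags, List.all_cons, List.all_nil, Bool.and_eq_true,
    Bool.and_true] at hpre
  obtain ⟨p1, p2, p3, p4⟩ := hpre
  have e1 := assign_eq tokens "flat" ((PySem.Dict.mk components).get? "flat")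
    (List.replicate tokens.length "O") PySem.Set.empty (by simp) (inv_init tokens.length) p1
  have e2 := assign_eq tokens "house_num" ((PySem.Dict.mk components).get? "house_num") _ _ e1.2.1 e1.2.2 p2
  have e3 := assign_eq tokens "house_name" ((PySem.Dict.mk components).get? "house_name") _ _ e2.2.1 e2.2.2 p3
  have e4 := assign_eq tokens "street" ((PySem.Dict.mk components).get? "street") _ _ e3.2.1 e3.2.2 p4
  have hb : create_bio_tags_alt tokens components =
      stepB2 (buildIndexB tokens) tokens (stepB2 (buildIndexB tokens) tokens (stepB2 (buildIndexB tokens) tokens (stepB2 (buildIndexB tokens) tokens (List.replicate tokens.length "O")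
        ((PySem.Dict.mk components).get? "flat") "flat")
        ((PySem.Dict.mk components).get? "house_num") "house_num")
        ((PySem.Dict.mk components).get? "house_name") "house_name")
        ((PySem.Dict.mk components).get? "street") "street" := rfl
  rw [hb, ← e1.1, ← e2.1, ← e3.1, ← e4.1]
  rfl
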